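-- pv_equiv track=rewrite | github.com/AerdnaNami/citation_evaluation | code/training/encoder_training/train_code/train_xlmr_ner_paragraph.py | remove_short_predicted_spans_word_labels
-- ===== SOURCE A (Python) =====
-- def remove_short_predicted_spans_word_labels(word_labels, min_span_len=4):
--     """
--     Given word-level BIO labels, drop predicted entity spans shorter than min_span_len
--     by converting their tokens to "O".
--
--     This operates AFTER bio_fix_sequence, so spans should begin with B-.
--     """
--     out = [(l or "O").strip() for l in word_labels]
--     n = len(out)
--     i = 0
--
--     while i < n:
--         lab = out[i]
--         if lab == "O":
--             i += 1
--             continue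
--
--         if lab.startswith("B-"):
--             ent = lab[2:]
--             start = i
--             i += 1
--             while i < n and out[i] == f"I-{ent}":
--                 i += 1
--             end = i
--             span_len = end - start
--
--             if span_len < int(min_span_len):
--                 for k in range(start, end):
--                     out[k] = "O"
--             continue
--
--         # If any weird I-* sneaks in, just move on (bio_fix should prevent this)
--         i += 1
--
--     return out
-- ===== SOURCE B (Python) =====
-- def remove_short_predicted_spans_word_labels(word_labels, min_span_len=4):
--     """Single streaming pass: keep a pending entity-span buffer and flush it
--     (as-is, or as 'O's if too short) whenever the span ends."""
--     m = int(min_span_len)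
--     out = []
--     tag = None   # expected I- continuation tag of the open span, or None
--     span = []    # labels of the open span
--     for l in word_labels:
--         lab = (l or "O").strip()
--         if tag is not None and lab == tag:
--             span.append(lab)
--             continue
--         if tag is not None:
--             out.extend(["O"] * len(span) if len(span) < m else span)
--             tag = None
--             span = []
--         if lab.startswith("B-"):
--             tag = "I-" + lab[2:]
--             span = [lab]
--         else:
--             out.append(lab)
--     if tag is not None:
--         out.extend(["O"] * len(span) if len(span) < m else span)
--     return out
-- ===== Notes on version B (the rewrite author's own statement) =====
-- stated objective: simpler
-- what changed: Replaces the index-driven while-loop with in-place backwards clearing by a single streaming pass that buffers the current entity span and flushes it (unchanged, or as 'O's when too short) when the span ends.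
import Mathlib
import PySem

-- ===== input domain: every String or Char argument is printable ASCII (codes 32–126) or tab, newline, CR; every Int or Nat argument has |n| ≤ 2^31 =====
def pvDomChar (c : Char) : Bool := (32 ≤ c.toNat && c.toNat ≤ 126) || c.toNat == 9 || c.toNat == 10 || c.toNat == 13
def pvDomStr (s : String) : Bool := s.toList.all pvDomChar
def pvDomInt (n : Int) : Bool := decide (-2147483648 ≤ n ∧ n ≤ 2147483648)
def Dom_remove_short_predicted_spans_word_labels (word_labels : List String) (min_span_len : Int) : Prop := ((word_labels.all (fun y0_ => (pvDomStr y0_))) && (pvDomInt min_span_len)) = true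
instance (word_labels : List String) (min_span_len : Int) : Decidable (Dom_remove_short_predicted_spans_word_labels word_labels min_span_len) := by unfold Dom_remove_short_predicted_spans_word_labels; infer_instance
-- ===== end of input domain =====

-- B replaces A's index-based while loop with in-place span clearing by a single
-- streaming pass buffering the current span; same O(n) cost, simpler shape.

-- ===== PORT A =====
-- (l or "O").strip()
def pvNormA (l : String) : String := PySem.Str.strip (if l == "" then "O" else l)

-- inner 'while i < n and out[i] == f"I-{ent}": i += 1'
def pvScanI (out : List String) (n : Nat) (tag : String) (i : Nat) : Nat :=
  if i < n ∧ out.getD i "" == tag then pvScanI out n tag (i + 1) else i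
termination_by n - i
decreasing_by omega

-- 'for k in range(start, end): out[k] = "O"'
def pvClearA (out : List String) (s e : Nat) : List String :=
  (List.range' s (e - s)).foldl (fun o k => o.set k "O") out

theorem pvScanI_ge (out : List String) (n : Nat) (tag : String) (i : Nat) :
    i ≤ pvScanI out n tag i := by
  unfold pvScanI
  split
  · exact le_trans (Nat.le_succ i) (pvScanI_ge out n tag (i + 1))
  · exact le_refl i
termination_by n - i
decreasing_by omega

-- the main 'while i < n' loop of A ('lab', 'ent', 'end' appear inline)
def pvLoopA (min_span_len : Int) (n : Nat) (out : List String) (i : Nat) : List String :=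
  if i < n then
    if out.getD i "" == "O" then pvLoopA min_span_len n out (i + 1)
    else if PySem.Str.startswith (out.getD i "") "B-" then
      if ((pvScanI out n ("I-" ++ PySem.Str.slice (out.getD i "") (some 2) none) (i + 1) - i : Nat) : Int) < min_span_len then
        pvLoopA min_span_len n
          (pvClearA out i (pvScanI out n ("I-" ++ PySem.Str.slice (out.getD i "") (some 2) none) (i + 1)))
          (pvScanI out n ("I-" ++ PySem.Str.slice (out.getD i "") (some 2) none) (i + 1))
      else pvLoopA min_span_len n out
        (pvScanI out n ("I-" ++ PySem.Str.slice (out.getD i "") (some 2) none) (i + 1))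
    else pvLoopA min_span_len n out (i + 1)
  else out
termination_by n - i
decreasing_by
  · omega
  · have := pvScanI_ge out n ("I-" ++ PySem.Str.slice (out.getD i "") (some 2) none) (i + 1); omega
  · have := pvScanI_ge out n ("I-" ++ PySem.Str.slice (out.getD i "") (some 2) none) (i + 1); omega
  · omega

def remove_short_predicted_spans_word_labels (word_labels : List String) (min_span_len : Int) : List String :=
  pvLoopA min_span_len (word_labels.map pvNormA).length (word_labels.map pvNormA) 0

-- ===== PORT B =====
-- '["O"] * len(span) if len(span) < m else span'
def pvEmitB (m : Int) (sp : List String) : List String :=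
  if (sp.length : Int) < m then List.replicate sp.length "O" else sp

-- the tail of the loop body: flush done, decide whether lab opens a new span
def pvOpenB (out : List String) (lab : String) :
    List String × Option (String × List String) :=
  if PySem.Str.startswith lab "B-" then
    (out, some ("I-" ++ PySem.Str.slice lab (some 2) none, [lab]))
  else (out ++ [lab], none)

-- one iteration of B's for-loop, on the already-normalised label
def pvStepN (m : Int) (st : List String × Option (String × List String))
    (lab : String) : List String × Option (String × List String) :=
  match st with
  | (out, some (tag, sp)) =>
    if lab == tag then (out, some (tag, sp ++ [lab]))
    else pvOpenB (out ++ pvEmitB m sp) lab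
  | (out, none) => pvOpenB out lab

def pvStepB (m : Int) (st : List String × Option (String × List String))
    (l : String) : List String × Option (String × List String) :=
  pvStepN m st (PySem.Str.strip (if l == "" then "O" else l))

-- the final 'if tag is not None: flush'
def pvFinishB (m : Int) (st : List String × Option (String × List String)) : List String :=
  match st with
  | (out, none) => out
  | (out, some (_, sp)) => out ++ pvEmitB m sp

def remove_short_predicted_spans_word_labels_alt (word_labels : List String) (min_span_len : Int) : List String :=
  pvFinishB min_span_len (word_labels.foldl (pvStepB min_span_len) ([], none))

-- ===== PRECONDITION & SPEC =====
def Spec_remove_short_predicted_spans_word_labels (word_labels : List String) (min_span_len : Int) (out : List String) : Prop := out = remove_short_predicted_spans_word_labels_alt word_labels min_span_len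
instance (word_labels : List String) (min_span_len : Int) (out : List String) : Decidable (Spec_remove_short_predicted_spans_word_labels word_labels min_span_len out) := by unfold Spec_remove_short_predicted_spans_word_labels; infer_instance

-- ===== CLAIM (what is proved, stated in full; the proofs are below) =====
def Claim_equal_remove_short_predicted_spans_word_labels : Prop := ∀ (word_labels : List String) (min_span_len : Int), Dom_remove_short_predicted_spans_word_labels word_labels min_span_len → Spec_remove_short_predicted_spans_word_labels word_labels min_span_len (remove_short_predicted_spans_word_labels word_labels min_span_len)

-- ===== LEMMAS AND PROOFS =====

theorem pv_takeWhile_eq_take (p : String → Bool) (l : List String) :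
    l.takeWhile p = l.take (l.takeWhile p).length := by
  induction l with
  | nil => simp
  | cons a t ih =>
    by_cases h : p a
    · simp only [List.takeWhile_cons_of_pos h, List.length_cons, List.take_succ_cons]
      exact congrArg _ ih
    · simp [List.takeWhile_cons_of_neg h]

theorem pv_dropWhile_eq_drop (p : String → Bool) (l : List String) :
    l.dropWhile p = l.drop (l.takeWhile p).length := by
  induction l with
  | nil => simp
  | cons a t ih =>
    by_cases h : p a
    · simpa [List.takeWhile_cons_of_pos h, List.dropWhile_cons_of_pos h] using ih
    · simp [List.takeWhile_cons_of_neg h, List.dropWhile_cons_of_neg h]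

-- common functional characterisation: process the normalised list front-to-back
def pvG (m : Int) : List String → List String
  | [] => []
  | lab :: rest =>
    if PySem.Str.startswith lab "B-" then
      pvEmitB m (lab :: rest.takeWhile (fun x => x == "I-" ++ PySem.Str.slice lab (some 2) none)) ++
        pvG m (rest.dropWhile (fun x => x == "I-" ++ PySem.Str.slice lab (some 2) none))
    else lab :: pvG m rest
termination_by xs => xs.length
decreasing_by
  · rw [pv_dropWhile_eq_drop]
    simp only [List.length_drop, List.length_cons]
    omega
  · simp

theorem pv_getD_eq (out : List String) (i : Nat) (h : i < out.length) :
    out.getD i "" = out[i] := by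
  simp [List.getD_eq_getElem?_getD, List.getElem?_eq_getElem h]

theorem pvScanI_spec (tag : String) (out : List String) (i : Nat) :
    pvScanI out out.length tag i =
      i + ((out.drop i).takeWhile (fun x => x == tag)).length := by
  rw [pvScanI]
  by_cases hi : i < out.length
  · have hdrop : out.drop i = out[i] :: out.drop (i + 1) :=
      List.drop_eq_getElem_cons hi
    have hg : out.getD i "" = out[i] := pv_getD_eq out i hi
    by_cases hb : (out[i] == tag) = true
    · rw [if_pos ⟨hi, by rw [hg]; exact hb⟩, pvScanI_spec tag out (i + 1), hdrop]
      simp only [List.takeWhile_cons, hb, if_true, List.length_cons]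
      omega
    · rw [if_neg (fun h => hb (by rw [← hg]; exact h.2)), hdrop]
      simp [List.takeWhile_cons, hb]
  · rw [if_neg (fun h => hi h.1), List.drop_eq_nil_of_le (by omega)]
    simp
termination_by out.length - i
decreasing_by omega

theorem pvClear_spec (d : Nat) : ∀ (s : Nat) (out : List String), s + d ≤ out.length →
    (List.range' s d).foldl (fun o k => o.set k "O") out =
      out.take s ++ List.replicate d "O" ++ out.drop (s + d) := by
  induction d with
  | zero => intro s out h; simp
  | succ d ih =>
    intro s out h
    have hs : s < out.length := by omega
    have hset : out.set s "O" = out.take s ++ "O" :: out.drop (s + 1) := by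
      rw [List.set_eq_take_append_cons_drop, if_pos hs]
    have hlen : (out.take s).length = s := by simp; omega
    rw [List.range'_succ, List.foldl_cons,
      ih (s + 1) (out.set s "O") (by simp; omega), hset]
    have ht : (out.take s ++ "O" :: out.drop (s + 1)).take (s + 1)
        = out.take s ++ ["O"] := by
      rw [List.take_append, hlen, List.take_of_length_le (by rw [hlen]; omega)]
      congr 1
      have h1 : s + 1 - s = 1 := by omega
      rw [h1]
      simp
    have hd : (out.take s ++ "O" :: out.drop (s + 1)).drop (s + 1 + d)
        = out.drop (s + (d + 1)) := by
      rw [List.drop_append, hlen, List.drop_eq_nil_of_le (by omega)]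
      have h1 : s + 1 + d - s = d + 1 := by omega
      rw [h1, List.nil_append, List.drop_succ_cons, List.drop_drop]
      congr 1
      omega
    rw [ht, hd, List.replicate_succ]
    simp

theorem pvClearA_foldl_length (ks : List Nat) : ∀ (out : List String),
    (ks.foldl (fun o k => o.set k "O") out).length = out.length := by
  induction ks with
  | nil => intro out; rfl
  | cons k t ih => intro out; rw [List.foldl_cons, ih]; simp

theorem pvClearA_length (out : List String) (s e : Nat) :
    (pvClearA out s e).length = out.length := by
  unfold pvClearA
  exact pvClearA_foldl_length _ out

theorem pvLoopA_eq (m : Int) (out : List String) (i : Nat) :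
    pvLoopA m out.length out i = out.take i ++ pvG m (out.drop i) := by
  rw [pvLoopA]
  by_cases hi : i < out.length
  · have hdrop : out.drop i = out[i] :: out.drop (i + 1) :=
      List.drop_eq_getElem_cons hi
    have hg : out.getD i "" = out[i] := pv_getD_eq out i hi
    have htake1 : out.take (i + 1) = out.take i ++ [out[i]] := by
      rw [List.take_succ]
      simp [List.getElem?_eq_getElem hi]
    rw [if_pos hi]
    simp only [hg]
    by_cases hO : (out[i] == "O") = true
    · have hOeq : out[i] = "O" := by simpa using hO
      rw [if_pos hO, pvLoopA_eq m out (i + 1), hdrop, pvG,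
        if_neg (show ¬(PySem.Str.startswith out[i] "B-" = true) by rw [hOeq]; decide),
        htake1, List.append_assoc, List.singleton_append]
    · rw [if_neg hO]
      by_cases hB : PySem.Str.startswith out[i] "B-" = true
      · rw [if_pos hB]
        have hscan : pvScanI out out.length
              ("I-" ++ PySem.Str.slice out[i] (some 2) none) (i + 1)
            = (i + 1) + ((out.drop (i + 1)).takeWhile
                (fun x => x == "I-" ++ PySem.Str.slice out[i] (some 2) none)).length :=
          pvScanI_spec _ out (i + 1)
        set tw := (out.drop (i + 1)).takeWhile
          (fun x => x == "I-" ++ PySem.Str.slice out[i] (some 2) none) with htw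
        have hrle : tw.length ≤ out.length - (i + 1) := by
          have h1 : ((out.drop (i + 1)).takeWhile
              (fun x => x == "I-" ++ PySem.Str.slice out[i] (some 2) none)).length
                ≤ (out.drop (i + 1)).length :=
            List.IsPrefix.length_le (List.takeWhile_prefix _)
          rw [← htw] at h1
          simp at h1
          omega
        have hrest : (out.drop (i + 1)).dropWhile
              (fun x => x == "I-" ++ PySem.Str.slice out[i] (some 2) none)
            = out.drop ((i + 1) + tw.length) := by
          rw [pv_dropWhile_eq_drop, List.drop_drop, ← htw, Nat.add_comm]
        have hsub : (i + 1) + tw.length - i = tw.length + 1 := by omega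
        rw [hscan, hsub, hdrop, pvG, if_pos hB]
        simp only [← htw, hrest]
        by_cases hshort : ((tw.length + 1 : Nat) : Int) < m
        · have hle : i + (tw.length + 1) ≤ out.length := by omega
          have hclear : pvClearA out i ((i + 1) + tw.length) =
              out.take i ++ List.replicate (tw.length + 1) "O"
                ++ out.drop (i + (tw.length + 1)) := by
            unfold pvClearA
            rw [hsub, pvClear_spec (tw.length + 1) i out hle]
          have hlen' : (pvClearA out i ((i + 1) + tw.length)).length = out.length := by
            rw [hclear]
            simp
            omega
          have ih := pvLoopA_eq m (pvClearA out i ((i + 1) + tw.length)) ((i + 1) + tw.length)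
          rw [hlen'] at ih
          rw [if_pos hshort, ih]
          have hti : (out.take i).length = i := by simp; omega
          have hlen2 : (out.take i ++ List.replicate (tw.length + 1) "O").length
              = (i + 1) + tw.length := by
            simp only [List.length_append, List.length_replicate, hti]
            omega
          have hcl_take : (pvClearA out i ((i + 1) + tw.length)).take ((i + 1) + tw.length)
              = out.take i ++ List.replicate (tw.length + 1) "O" := by
            rw [hclear, List.take_left' hlen2]
          have hcl_drop : (pvClearA out i ((i + 1) + tw.length)).drop ((i + 1) + tw.length)
              = out.drop ((i + 1) + tw.length) := by
            rw [hclear, List.drop_left' hlen2]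
            congr 1
            omega
          rw [hcl_take, hcl_drop]
          have hemit : pvEmitB m (out[i] :: tw) = List.replicate (tw.length + 1) "O" := by
            unfold pvEmitB
            rw [if_pos (by simp only [List.length_cons]; exact_mod_cast hshort)]
            simp
          rw [hemit]
          simp [Nat.add_comm, Nat.add_assoc, Nat.add_left_comm]
        · have ih := pvLoopA_eq m out ((i + 1) + tw.length)
          rw [if_neg hshort, ih]
          have htk : out.take ((i + 1) + tw.length) = out.take i ++ (out[i] :: tw) := by
            have h1 : (i + 1) + tw.length = i + (tw.length + 1) := by omega
            rw [h1, List.take_add, hdrop, List.take_succ_cons]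
            congr 2
            rw [htw, ← pv_takeWhile_eq_take]
          rw [htk]
          have hemit : pvEmitB m (out[i] :: tw) = out[i] :: tw := by
            unfold pvEmitB
            rw [if_neg (by simp only [List.length_cons]; exact_mod_cast hshort)]
          rw [hemit]
          simp
      · rw [if_neg hB, pvLoopA_eq m out (i + 1), hdrop, pvG, if_neg hB, htake1,
          List.append_assoc, List.singleton_append]
  · rw [if_neg hi, List.drop_eq_nil_of_le (by omega),
      List.take_of_length_le (by omega), pvG]
    simp
termination_by out.length - i
decreasing_by
  all_goals first
    | omega
    | (rw [pvClearA_length]; omega)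

-- B's fold, characterised by pvG (first part: no open span; second: open span)
theorem pvFoldB_eq (m : Int) (ys : List String) :
    (∀ out, pvFinishB m (ys.foldl (pvStepN m) (out, none)) = out ++ pvG m ys) ∧
    (∀ out tag sp, pvFinishB m (ys.foldl (pvStepN m) (out, some (tag, sp)))
      = out ++ pvEmitB m (sp ++ ys.takeWhile (fun x => x == tag))
            ++ pvG m (ys.dropWhile (fun x => x == tag))) := by
  induction ys with
  | nil =>
    constructor
    · intro out; simp [pvFinishB, pvG]
    · intro out tag sp; simp [pvFinishB, pvG]
  | cons y t ih =>
    have open_case : ∀ out, pvFinishB m ((y :: t).foldl (pvStepN m) (out, none))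
        = out ++ pvG m (y :: t) := by
      intro out
      rw [List.foldl_cons]
      show pvFinishB m (t.foldl (pvStepN m) (pvOpenB out y)) = _
      unfold pvOpenB
      by_cases hB : PySem.Str.startswith y "B-" = true
      · rw [if_pos hB, ih.2, pvG, if_pos hB]
        simp
      · rw [if_neg hB, ih.1, pvG, if_neg hB]
        simp
    constructor
    · exact open_case
    · intro out tag sp
      rw [List.foldl_cons]
      show pvFinishB m (t.foldl (pvStepN m)
        (if y == tag then (out, some (tag, sp ++ [y]))
         else pvOpenB (out ++ pvEmitB m sp) y)) = _
      by_cases hy : (y == tag) = true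
      · have hyeq : y = tag := by simpa using hy
        rw [if_pos hy, ih.2]
        simp only [List.takeWhile_cons, List.dropWhile_cons, hy, if_true]
        simp [hyeq]
      · rw [if_neg hy]
        have h1 : pvFinishB m (t.foldl (pvStepN m) (pvOpenB (out ++ pvEmitB m sp) y))
            = (out ++ pvEmitB m sp) ++ pvG m (y :: t) := by
          have h2 := open_case (out ++ pvEmitB m sp)
          rw [List.foldl_cons] at h2
          exact h2
        rw [h1]
        simp only [List.takeWhile_cons, List.dropWhile_cons, hy, if_false]
        simp

theorem pvAlt_eq_G (word_labels : List String) (m : Int) :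
    remove_short_predicted_spans_word_labels_alt word_labels m
      = pvG m (word_labels.map pvNormA) := by
  unfold remove_short_predicted_spans_word_labels_alt
  have hmap : word_labels.foldl (pvStepB m) (([] : List String), none)
      = (word_labels.map pvNormA).foldl (pvStepN m) ([], none) := by
    rw [List.foldl_map]
    rfl
  rw [hmap, (pvFoldB_eq m (word_labels.map pvNormA)).1]
  simp

-- ===== VERDICT (by name: the statement is the Claim_ definition above) =====
theorem remove_short_predicted_spans_word_labels_spec : Claim_equal_remove_short_predicted_spans_word_labels := by
  intro word_labels min_span_len _
  show _ = _
  rw [pvAlt_eq_G]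
  unfold remove_short_predicted_spans_word_labels
  rw [pvLoopA_eq]
  simp
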